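-- pv_equiv track=rewrite | github.com/manueloostveen/boxguru3 | products/product_fit_logic.py | find_max_volume
-- ===== SOURCE A (Python) =====
-- def find_max_volume(list_of_boxes):
--     """
--     definition to determine one box in a list of boxes that has the largest volume
--     :param list_of_boxes: list of lists with box dimensions
--     :return: list with xyz box dimensions
--     """
--     largest_box = None
--     largest_volume = float("-inf")
--
--     for box in list_of_boxes:
--         volume = box[0] * box[1] * box[2]
--         if volume > largest_volume:
--             largest_box = box
--             largest_volume = volume
--
--     return largest_box
-- ===== SOURCE B (Python) =====
-- def find_max_volume(list_of_boxes):
--     """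
--     definition to determine one box in a list of boxes that has the largest volume
--     :param list_of_boxes: list of lists with box dimensions
--     :return: list with xyz box dimensions
--     """
--     if not list_of_boxes:
--         return None
--     return sorted(list_of_boxes, key=lambda b: b[0] * b[1] * b[2], reverse=True)[0]
-- ===== Notes on version B (the rewrite author's own statement) =====
-- stated objective: idiomatic
-- what changed: Replaces the manual accumulator loop with a running maximum by a stable descending sort on volume plus taking the first element (stability preserves A's first-wins tie-breaking), with an explicit empty-list guard.
import Mathlib
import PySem

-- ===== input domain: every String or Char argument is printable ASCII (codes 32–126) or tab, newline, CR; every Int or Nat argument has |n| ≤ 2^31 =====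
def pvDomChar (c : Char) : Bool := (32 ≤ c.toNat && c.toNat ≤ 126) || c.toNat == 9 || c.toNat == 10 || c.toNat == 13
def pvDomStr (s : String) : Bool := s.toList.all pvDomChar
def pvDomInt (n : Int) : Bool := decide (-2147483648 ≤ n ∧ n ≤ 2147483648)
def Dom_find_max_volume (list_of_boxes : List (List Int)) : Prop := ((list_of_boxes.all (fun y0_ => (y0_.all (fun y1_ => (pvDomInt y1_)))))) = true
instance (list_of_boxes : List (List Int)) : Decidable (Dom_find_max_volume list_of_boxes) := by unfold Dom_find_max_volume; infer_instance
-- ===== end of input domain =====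

-- B replaces A's manual running-maximum loop by a stable descending sort on volume and taking the
-- first element (stability keeps A's first-wins tie-breaking); same result, more idiomatic.


-- the volume key box[0]*box[1]*box[2]; Pre_ guarantees the indices are in range, so pyGetD is exact
def pvVol (b : List Int) : Int :=
  PySem.List.pyGetD b 0 0 * PySem.List.pyGetD b 1 0 * PySem.List.pyGetD b 2 0

-- ===== PORT A =====
-- largest_volume starts at float("-inf"); all later values are ints, so it is modelled exactly by
-- Option Int with none = -inf (the comparison 'volume > -inf' is always true).
def find_max_volume (list_of_boxes : List (List Int)) : Option (List Int) :=
  (list_of_boxes.foldl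
    (fun (acc : Option (List Int) × Option Int) box =>
      let volume := pvVol box
      match acc.2 with
      | none => (some box, some volume)
      | some lv => if volume > lv then (some box, some volume) else acc)
    (none, none)).1

-- ===== PORT B =====
def find_max_volume_alt (list_of_boxes : List (List Int)) : Option (List Int) :=
  match list_of_boxes with
  | [] => none
  | _ :: _ => (PySem.List.sorted list_of_boxes pvVol true).head?

-- ===== PRECONDITION & SPEC =====
-- Pre_ excludes boxes with fewer than 3 dimensions, on which both Pythons raise IndexError.
def Pre_find_max_volume (list_of_boxes : List (List Int)) : Prop :=
  ∀ b ∈ list_of_boxes, 3 ≤ b.length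
instance (list_of_boxes : List (List Int)) : Decidable (Pre_find_max_volume list_of_boxes) := by
  unfold Pre_find_max_volume; infer_instance
def pvWitness_find_max_volume : List (List Int) := [[1, 2, 3], [2, 2, 2], [3, 1, 2]]

def Spec_find_max_volume (list_of_boxes : List (List Int)) (out : Option (List Int)) : Prop := out = find_max_volume_alt list_of_boxes
instance (list_of_boxes : List (List Int)) (out : Option (List Int)) : Decidable (Spec_find_max_volume list_of_boxes out) := by unfold Spec_find_max_volume; infer_instance

-- ===== CLAIM (what is proved, stated in full; the proofs are below) =====
def Claim_equal_find_max_volume : Prop := ∀ (list_of_boxes : List (List Int)), Dom_find_max_volume list_of_boxes → Pre_find_max_volume list_of_boxes → Spec_find_max_volume list_of_boxes (find_max_volume list_of_boxes)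

-- ===== LEMMAS AND PROOFS =====

-- loop invariant: A's accumulator holds the head of the insertion-sorted (descending, stable)
-- list built so far, together with its volume; t (the sorted tail) is arbitrary.
theorem pv_loop (xs : List (List Int)) : ∀ (m : List Int) (t : List (List Int)),
    (xs.foldl (fun a x => PySem.List.insertBy (fun a b => decide (pvVol b < pvVol a)) x a) (m :: t)).head?
      = (xs.foldl
          (fun (acc : Option (List Int) × Option Int) box =>
            let volume := pvVol box
            match acc.2 with
            | none => (some box, some volume)
            | some lv => if volume > lv then (some box, some volume) else acc)
          (some m, some (pvVol m))).1 := by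
  induction xs with
  | nil => intro m t; simp
  | cons x xs ih =>
    intro m t
    by_cases h : pvVol m < pvVol x
    · simpa [List.foldl_cons, PySem.List.insertBy, h] using ih x (m :: t)
    · simpa [List.foldl_cons, PySem.List.insertBy, h, not_lt.mp h] using ih m _

-- ===== VERDICT (by name: the statement is the Claim_ definition above) =====
theorem find_max_volume_spec : Claim_equal_find_max_volume := by
  intro xs _ _
  unfold Spec_find_max_volume find_max_volume find_max_volume_alt
  cases xs with
  | nil => rfl
  | cons b rest =>
    rw [PySem.List.sorted_rev_eq_foldl_insertBy]
    simpa [List.foldl_cons, PySem.List.insertBy] using (pv_loop rest b []).symm
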